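-- pv_equiv track=rewrite | github.com/UroBs17/Programacion-competitiva | programacion competitiva/ecigma/uva ejercicios/palindrome.py | isMirrored
-- ===== SOURCE A (Python) =====
-- dic={"A":"A","E":"3","H":"H","I":"I","J":"L","L":"J","M":"M","O":"O","S":"2","T":"T","U":"U","V":"V","W":"W","X":"X","Y":"Y","Z":"5","1":"1","2":"S","3":"E","5":"Z","8":"8"}
--
-- def isMirrored(word):
--     wordL=list(word)
--     mirrL=list()
--     for i in range(len(word)):
--         if wordL[i] in dic:
--             mirrL.append(dic[wordL[i]])
--         else:
--             return False
--     mirrL=mirrL[::-1]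
--     return wordL==mirrL
-- ===== SOURCE B (Python) =====
-- KEYS = "AEHIJLMOSTUVWXYZ12358"
-- VALS = "A3HILJMO2TUVWXY51SEZ8"
-- mirror = dict(zip(KEYS, VALS))
--
-- def isMirrored(word):
--     # Two-pointer pass over half the word: the mirror table is an involution,
--     # so one lookup + comparison per (front, back) pair decides everything.
--     h = (len(word) + 1) // 2
--     return all(mirror.get(a) == b for a, b in zip(word[:h], reversed(word)))
-- ===== Notes on version B (the rewrite author's own statement) =====
-- stated objective: simpler
-- what changed: Replaces A's build-a-mirrored-copy-then-reverse-and-compare with a single pass over half the word, zipping the front half against the reversed word and checking one table lookup per pair (correct because the mirror table is an involution).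
import Mathlib
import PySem

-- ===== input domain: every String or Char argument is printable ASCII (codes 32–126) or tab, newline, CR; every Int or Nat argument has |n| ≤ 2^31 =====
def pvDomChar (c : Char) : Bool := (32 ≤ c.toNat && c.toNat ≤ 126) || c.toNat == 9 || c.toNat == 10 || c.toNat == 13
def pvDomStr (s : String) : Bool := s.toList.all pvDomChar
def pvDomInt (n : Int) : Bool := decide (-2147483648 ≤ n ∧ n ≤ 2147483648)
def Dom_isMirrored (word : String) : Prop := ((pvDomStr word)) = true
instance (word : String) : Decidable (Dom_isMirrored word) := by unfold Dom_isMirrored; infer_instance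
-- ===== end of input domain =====

-- B replaces A's map-the-whole-word-then-reverse-and-compare with a single pass
-- zipping the front half against the reversed word (objective: simpler; same cost).

-- ===== PORT A =====
-- A's module-level dict literal
def dic : PySem.Dict Char Char := PySem.Dict.ofList
  [('A','A'),('E','3'),('H','H'),('I','I'),('J','L'),('L','J'),('M','M'),('O','O'),
   ('S','2'),('T','T'),('U','U'),('V','V'),('W','W'),('X','X'),('Y','Y'),('Z','5'),
   ('1','1'),('2','S'),('3','E'),('5','Z'),('8','8')]

-- A's for-loop: walk the chars in order; unknown char → early False (none);
-- otherwise collect dic[c] in order (cons-on-return = mirrL's append order)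
def mirrListA : List Char → Option (List Char)
  | [] => some []
  | c :: rest =>
    match dic.get? c with
    | none => none
    | some d =>
      match mirrListA rest with
      | none => none
      | some m => some (d :: m)

def isMirrored (word : String) : Bool :=
  match mirrListA word.toList with
  | none => false
  | some mirrL => word.toList == mirrL.reverse

-- ===== PORT B =====
-- B's table: mirror = dict(zip(KEYS, VALS))
def keysB : String := "AEHIJLMOSTUVWXYZ12358"
def valsB : String := "A3HILJMO2TUVWXY51SEZ8"
def mirrorB : PySem.Dict Char Char := PySem.Dict.ofList (keysB.toList.zip valsB.toList)

-- all(mirror.get(a) == b for a, b in zip(word[:h], reversed(word)))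
def isMirrored_alt (word : String) : Bool :=
  let l := word.toList
  let h := (l.length + 1) / 2
  ((l.take h).zip l.reverse).all (fun p => mirrorB.get? p.1 == some p.2)

-- ===== PRECONDITION & SPEC =====
def Spec_isMirrored (word : String) (out : Bool) : Prop := out = isMirrored_alt word
instance (word : String) (out : Bool) : Decidable (Spec_isMirrored word out) := by unfold Spec_isMirrored; infer_instance

-- ===== CLAIM (what is proved, stated in full; the proofs are below) =====
def Claim_equal_isMirrored : Prop := ∀ (word : String), Dom_isMirrored word → Spec_isMirrored word (isMirrored word)

-- ===== LEMMAS AND PROOFS =====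

-- B's zip-built table is the same finite map as A's literal
lemma mirrorB_eq_dic : mirrorB = dic := by decide

-- the total value function of the table
def gdic (c : Char) : Char := (dic.get? c).getD ' '

-- the per-index condition both characterizations share
def Qd (l : List Char) (i : Nat) : Prop :=
  dic.get? (l.getD i ' ') = some (l.getD (l.length - 1 - i) ' ')

-- dic is an involution: every (key, value) lookup reverses
lemma dic_involutive (a b : Char) (h : dic.get? a = some b) : dic.get? b = some a := by
  have hm := PySem.Dict.mem_items_of_get?_eq_some dic h
  rw [show dic.items = [('A','A'),('E','3'),('H','H'),('I','I'),('J','L'),('L','J'),('M','M'),('O','O'),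
   ('S','2'),('T','T'),('U','U'),('V','V'),('W','W'),('X','X'),('Y','Y'),('Z','5'),
   ('1','1'),('2','S'),('3','E'),('5','Z'),('8','8')] from by decide] at hm
  simp only [List.mem_cons, List.not_mem_nil, or_false, Prod.mk.injEq] at hm
  rcases hm with ⟨rfl,rfl⟩|⟨rfl,rfl⟩|⟨rfl,rfl⟩|⟨rfl,rfl⟩|⟨rfl,rfl⟩|⟨rfl,rfl⟩|⟨rfl,rfl⟩|⟨rfl,rfl⟩|⟨rfl,rfl⟩|⟨rfl,rfl⟩|⟨rfl,rfl⟩|⟨rfl,rfl⟩|⟨rfl,rfl⟩|⟨rfl,rfl⟩|⟨rfl,rfl⟩|⟨rfl,rfl⟩|⟨rfl,rfl⟩|⟨rfl,rfl⟩|⟨rfl,rfl⟩|⟨rfl,rfl⟩|⟨rfl,rfl⟩ <;> decide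

-- A's loop computes: map gdic if every char is a key, else none
lemma mirrListA_eq (l : List Char) :
    mirrListA l = if l.all (fun c => (dic.get? c).isSome) then some (l.map gdic) else none := by
  induction l with
  | nil => simp [mirrListA]
  | cons c rest ih =>
    simp only [mirrListA, List.all_cons, List.map_cons]
    cases h : dic.get? c with
    | none => simp
    | some d =>
      rw [ih]
      by_cases hall : rest.all (fun c => (dic.get? c).isSome)
      · simp [hall, h, gdic]
      · simp [hall]

-- A returns true exactly when Qd holds at every index
lemma isMirrored_iff (word : String) :
    isMirrored word = true ↔ ∀ i < word.toList.length, Qd word.toList i := by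
  unfold isMirrored
  rw [mirrListA_eq]
  set l := word.toList with hl
  by_cases hall : l.all (fun c => (dic.get? c).isSome)
  · rw [if_pos hall]
    simp only [beq_iff_eq]
    constructor
    · intro heq i hi
      unfold Qd
      have hmem : l.getD i ' ' ∈ l := by
        rw [List.getD_eq_getElem l ' ' hi]; exact List.getElem_mem hi
      have hsome := (List.all_eq_true.mp hall) _ hmem
      cases hg : dic.get? (l.getD i ' ') with
      | none => rw [hg] at hsome; simp at hsome
      | some d =>
        have hd : gdic (l.getD i ' ') = d := by unfold gdic; rw [hg]; rfl
        have hn1 : l.length - 1 - i < l.length := by omega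
        have := congrArg (fun xs => xs.getD (l.length - 1 - i) ' ') heq
        simp only at this
        rw [List.getD_eq_getElem l ' ' hn1,
            List.getD_eq_getElem _ ' ' (by simpa using hn1)] at this
        rw [List.getElem_reverse, List.getElem_map] at this
        simp only [List.length_map] at this
        have hidx : l.length - 1 - (l.length - 1 - i) = i := by omega
        simp only [hidx] at this
        rw [List.getD_eq_getElem l ' ' hi] at hd
        rw [List.getD_eq_getElem l ' ' hn1, this, hd]
    · intro h
      apply List.ext_getElem (by simp)
      intro i h1 h2
      rw [List.getElem_reverse, List.getElem_map]
      have hn1 : l.length - 1 - i < l.length := by omega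
      have hq := h (l.length - 1 - i) hn1
      unfold Qd at hq
      have hidx : l.length - 1 - (l.length - 1 - i) = i := by omega
      rw [hidx, List.getD_eq_getElem l ' ' hn1, List.getD_eq_getElem l ' ' h1] at hq
      have : gdic l[l.length - 1 - i] = l[i] := by unfold gdic; rw [hq]; rfl
      simp only [List.length_map]
      exact this.symm
  · rw [if_neg hall]
    simp only [Bool.false_eq_true, false_iff, not_forall]
    simp only [List.all_eq_true, not_forall] at hall
    push Not at hall
    obtain ⟨c, hc, hnone⟩ := hall
    obtain ⟨i, hi, rfl⟩ := List.mem_iff_getElem.mp hc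
    refine ⟨i, hi, ?_⟩
    unfold Qd
    rw [List.getD_eq_getElem l ' ' hi]
    intro hq
    rw [hq] at hnone
    simp at hnone

-- B returns true exactly when Qd holds on the first half
lemma isMirrored_alt_iff (word : String) :
    isMirrored_alt word = true ↔ ∀ i < (word.toList.length + 1) / 2, Qd word.toList i := by
  unfold isMirrored_alt
  rw [mirrorB_eq_dic]
  set l := word.toList with hl
  have hhalf : (l.length + 1) / 2 ≤ l.length := by omega
  have hlen : ((l.take ((l.length + 1) / 2)).zip l.reverse).length = (l.length + 1) / 2 := by
    simp [List.length_zip]; omega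
  simp only [List.all_eq_true]
  constructor
  · intro h i hi
    have hiz : i < ((l.take ((l.length + 1) / 2)).zip l.reverse).length := by omega
    have hp := h _ (List.getElem_mem hiz)
    rw [List.getElem_zip] at hp
    simp only [beq_iff_eq] at hp
    unfold Qd
    have hi1 : i < l.length := by omega
    have hir : l.length - 1 - i < l.length := by omega
    rw [List.getElem_take, List.getElem_reverse] at hp
    rw [List.getD_eq_getElem l ' ' hi1, List.getD_eq_getElem l ' ' hir]
    exact hp
  · intro h p hp
    obtain ⟨i, hiz, rfl⟩ := List.mem_iff_getElem.mp hp
    have hi : i < (l.length + 1) / 2 := by omega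
    have hq := h i hi
    unfold Qd at hq
    have hi1 : i < l.length := by omega
    have hir : l.length - 1 - i < l.length := by omega
    rw [List.getD_eq_getElem l ' ' hi1, List.getD_eq_getElem l ' ' hir] at hq
    rw [List.getElem_zip, List.getElem_take, List.getElem_reverse]
    simp only [beq_iff_eq]
    exact hq

-- the involution extends the half-range condition to all indices
lemma half_to_full (l : List Char) (h : ∀ i < (l.length + 1) / 2, Qd l i) :
    ∀ i < l.length, Qd l i := by
  intro i hi
  by_cases hhalf : i < (l.length + 1) / 2
  · exact h i hhalf
  · have hj : l.length - 1 - i < (l.length + 1) / 2 := by omega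
    have hQ := h _ hj
    unfold Qd at hQ ⊢
    have hidx : l.length - 1 - (l.length - 1 - i) = i := by omega
    rw [hidx] at hQ
    exact dic_involutive _ _ hQ

-- ===== VERDICT (by name: the statement is the Claim_ definition above) =====
theorem isMirrored_spec : Claim_equal_isMirrored := by
  intro word _
  unfold Spec_isMirrored
  have hA := isMirrored_iff word
  have hB := isMirrored_alt_iff word
  cases ha : isMirrored word <;> cases hb : isMirrored_alt word
  · rfl
  · exact absurd (hA.mpr (half_to_full _ (hB.mp hb))) (by simp [ha])
  · have hfull : ∀ i < (word.toList.length + 1) / 2, Qd word.toList i := by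
      intro i hi
      exact hA.mp ha i (by omega)
    exact absurd (hB.mpr hfull) (by simp [hb])
  · rfl
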